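-- pv_equiv track=rewrite | github.com/nbarker2021/Storage | cqe_unified_repository.tar_1/cqe_unified/cqe/utils.py | _murmur_hash
-- ===== SOURCE A (Python) =====
-- from typing import Dict, List, Any, Tuple, Generator, Callable, Optional
--
-- def _murmur_hash(key: Any) -> int:
--     """ MurmurHash3 32-bit implementation. """
--     key_bytes = str(key).encode('utf-8')
--     length = len(key_bytes)
--     seed = 0x9747b28c # Example seed
--     c1 = 0xcc9e2d51
--     c2 = 0x1b873593
--     r1 = 15
--     r2 = 13
--     m = 5
--     n = 0xe6546b64
--     hash_value = seed
--
--     nblocks = length // 4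
--     for i in range(nblocks):
--         idx = i * 4
--         k = (key_bytes[idx] |
--              (key_bytes[idx + 1] << 8) |
--              (key_bytes[idx + 2] << 16) |
--              (key_bytes[idx + 3] << 24))
--         k = (k * c1) & 0xFFFFFFFF
--         k = ((k << r1) | (k >> (32 - r1))) & 0xFFFFFFFF
--         k = (k * c2) & 0xFFFFFFFF
--         hash_value ^= k
--         hash_value = ((hash_value << r2) | (hash_value >> (32 - r2))) & 0xFFFFFFFF
--         hash_value = ((hash_value * m) + n) & 0xFFFFFFFF
--
--     tail_index = nblocks * 4
--     k = 0
--     tail_size = length & 3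
--     if tail_size >= 3: k ^= key_bytes[tail_index + 2] << 16
--     if tail_size >= 2: k ^= key_bytes[tail_index + 1] << 8
--     if tail_size >= 1: k ^= key_bytes[tail_index]
--     if tail_size > 0:
--         k = (k * c1) & 0xFFFFFFFF
--         k = ((k << r1) | (k >> (32 - r1))) & 0xFFFFFFFF
--         k = (k * c2) & 0xFFFFFFFF
--         hash_value ^= k
--
--     hash_value ^= length
--     hash_value ^= hash_value >> 16
--     hash_value = (hash_value * 0x85ebca6b) & 0xFFFFFFFF
--     hash_value ^= hash_value >> 13
--     hash_value = (hash_value * 0xc2b2ae35) & 0xFFFFFFFF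
--     hash_value ^= hash_value >> 16
--
--     return abs(hash_value) # Ensure positive
-- ===== SOURCE B (Python) =====
-- def _murmur_hash(key):
--     """ MurmurHash3 32-bit: single streaming pass that flushes each 4-byte word. """
--     data = str(key).encode('utf-8')
--     c1 = 0xcc9e2d51
--     c2 = 0x1b873593
--     h = 0x9747b28c  # seed
--     k = 0
--     cnt = 0
--     for byte in data:
--         k |= byte << (8 * cnt)
--         cnt += 1
--         if cnt == 4:
--             k = (k * c1) & 0xFFFFFFFF
--             k = ((k << 15) | (k >> 17)) & 0xFFFFFFFF
--             k = (k * c2) & 0xFFFFFFFF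
--             h ^= k
--             h = ((h << 13) | (h >> 19)) & 0xFFFFFFFF
--             h = (h * 5 + 0xe6546b64) & 0xFFFFFFFF
--             k = 0
--             cnt = 0
--     if cnt:
--         k = (k * c1) & 0xFFFFFFFF
--         k = ((k << 15) | (k >> 17)) & 0xFFFFFFFF
--         k = (k * c2) & 0xFFFFFFFF
--         h ^= k
--     h ^= len(data)
--     h ^= h >> 16
--     h = (h * 0x85ebca6b) & 0xFFFFFFFF
--     h ^= h >> 13
--     h = (h * 0xc2b2ae35) & 0xFFFFFFFF
--     h ^= h >> 16
--     return h
-- ===== Notes on version B (the rewrite author's own statement) =====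
-- stated objective: alternative
-- what changed: Replaces the indexed loop over nblocks plus a separate 1-3 byte tail block by a single streaming pass that ORs each byte into a current word and flushes the MurmurHash block mix whenever four bytes are collected, with the leftover partial word mixed once at the end; the no-op abs() is dropped.
import Mathlib
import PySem

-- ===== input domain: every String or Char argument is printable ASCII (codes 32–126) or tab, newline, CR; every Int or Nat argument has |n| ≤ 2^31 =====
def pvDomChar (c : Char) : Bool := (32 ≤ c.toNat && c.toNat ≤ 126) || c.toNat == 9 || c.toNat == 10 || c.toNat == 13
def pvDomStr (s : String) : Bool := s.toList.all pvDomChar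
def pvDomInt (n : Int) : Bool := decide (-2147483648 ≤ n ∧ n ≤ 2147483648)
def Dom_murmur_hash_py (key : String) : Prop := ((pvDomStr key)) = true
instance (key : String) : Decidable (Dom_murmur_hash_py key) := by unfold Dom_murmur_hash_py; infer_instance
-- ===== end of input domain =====

-- B streams the bytes, flushing the MurmurHash3 block mix every 4 bytes, instead of A's
-- indexed loop over nblocks plus a separate tail block; return values agree on Dom.

-- ===== PORT A =====
-- On Dom the key is ASCII, so str(key).encode('utf-8') is the list of character codes.
def murmur_hash_py (key : String) : Int :=
  let key_bytes := key.toList.map (fun c => c.toNat)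
  let length := key_bytes.length
  let seed : Nat := 0x9747b28c
  let c1 : Nat := 0xcc9e2d51
  let c2 : Nat := 0x1b873593
  let nblocks := length / 4
  let hash_value := (List.range nblocks).foldl (fun hash_value i =>
    let idx := i * 4
    let k := key_bytes.getD idx 0 |||
             (key_bytes.getD (idx+1) 0 <<< 8) |||
             (key_bytes.getD (idx+2) 0 <<< 16) |||
             (key_bytes.getD (idx+3) 0 <<< 24)
    let k := (k * c1) &&& 0xFFFFFFFF
    let k := ((k <<< 15) ||| (k >>> 17)) &&& 0xFFFFFFFF
    let k := (k * c2) &&& 0xFFFFFFFF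
    let hash_value := hash_value ^^^ k
    let hash_value := ((hash_value <<< 13) ||| (hash_value >>> 19)) &&& 0xFFFFFFFF
    (hash_value * 5 + 0xe6546b64) &&& 0xFFFFFFFF) seed
  let tail_index := nblocks * 4
  let k : Nat := 0
  let tail_size := length &&& 3
  let k := if tail_size ≥ 3 then k ^^^ (key_bytes.getD (tail_index+2) 0 <<< 16) else k
  let k := if tail_size ≥ 2 then k ^^^ (key_bytes.getD (tail_index+1) 0 <<< 8) else k
  let k := if tail_size ≥ 1 then k ^^^ key_bytes.getD tail_index 0 else k
  let hash_value := if tail_size > 0 then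
      let k := (k * c1) &&& 0xFFFFFFFF
      let k := ((k <<< 15) ||| (k >>> 17)) &&& 0xFFFFFFFF
      let k := (k * c2) &&& 0xFFFFFFFF
      hash_value ^^^ k
    else hash_value
  let hash_value := hash_value ^^^ length
  let hash_value := hash_value ^^^ (hash_value >>> 16)
  let hash_value := (hash_value * 0x85ebca6b) &&& 0xFFFFFFFF
  let hash_value := hash_value ^^^ (hash_value >>> 13)
  let hash_value := (hash_value * 0xc2b2ae35) &&& 0xFFFFFFFF
  let hash_value := hash_value ^^^ (hash_value >>> 16)
  |(hash_value : Int)|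

-- ===== PORT B =====
def murmur_hash_py_alt (key : String) : Int :=
  let data := key.toList.map (fun c => c.toNat)
  let st := data.foldl (fun (st : Nat × Nat × Nat) byte =>
    let k := st.1 ||| (byte <<< (8 * st.2.1))
    let cnt := st.2.1 + 1
    let h := st.2.2
    if cnt == 4 then
      let k := (k * 0xcc9e2d51) &&& 0xFFFFFFFF
      let k := ((k <<< 15) ||| (k >>> 17)) &&& 0xFFFFFFFF
      let k := (k * 0x1b873593) &&& 0xFFFFFFFF
      let h := h ^^^ k
      let h := ((h <<< 13) ||| (h >>> 19)) &&& 0xFFFFFFFF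
      ((0 : Nat), (0 : Nat), (h * 5 + 0xe6546b64) &&& 0xFFFFFFFF)
    else (k, cnt, h)) ((0 : Nat), (0 : Nat), (0x9747b28c : Nat))
  let h := if st.2.1 ≠ 0 then
      let k := (st.1 * 0xcc9e2d51) &&& 0xFFFFFFFF
      let k := ((k <<< 15) ||| (k >>> 17)) &&& 0xFFFFFFFF
      let k := (k * 0x1b873593) &&& 0xFFFFFFFF
      st.2.2 ^^^ k
    else st.2.2
  let h := h ^^^ data.length
  let h := h ^^^ (h >>> 16)
  let h := (h * 0x85ebca6b) &&& 0xFFFFFFFF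
  let h := h ^^^ (h >>> 13)
  let h := (h * 0xc2b2ae35) &&& 0xFFFFFFFF
  let h := h ^^^ (h >>> 16)
  (h : Int)

-- ===== PRECONDITION & SPEC =====
def Spec_murmur_hash_py (key : String) (out : Int) : Prop := out = murmur_hash_py_alt key
instance (key : String) (out : Int) : Decidable (Spec_murmur_hash_py key out) := by unfold Spec_murmur_hash_py; infer_instance

-- ===== CLAIM (what is proved, stated in full; the proofs are below) =====
def Claim_equal_murmur_hash_py : Prop := ∀ (key : String), Dom_murmur_hash_py key → Spec_murmur_hash_py key (murmur_hash_py key)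

-- ===== LEMMAS AND PROOFS =====

-- Shared pieces of both ports, written with exactly the ports' expressions (definitional).
def pvMixK (k : Nat) : Nat :=
  let k := (k * 0xcc9e2d51) &&& 0xFFFFFFFF
  let k := ((k <<< 15) ||| (k >>> 17)) &&& 0xFFFFFFFF
  (k * 0x1b873593) &&& 0xFFFFFFFF

def pvStepH (h k : Nat) : Nat :=
  let h := h ^^^ pvMixK k
  let h := ((h <<< 13) ||| (h >>> 19)) &&& 0xFFFFFFFF
  (h * 5 + 0xe6546b64) &&& 0xFFFFFFFF

def pvFin (len h : Nat) : Nat :=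
  let h := h ^^^ len
  let h := h ^^^ (h >>> 16)
  let h := (h * 0x85ebca6b) &&& 0xFFFFFFFF
  let h := h ^^^ (h >>> 13)
  let h := (h * 0xc2b2ae35) &&& 0xFFFFFFFF
  h ^^^ (h >>> 16)

def pvWord4 (L : List Nat) (idx : Nat) : Nat :=
  L.getD idx 0 ||| (L.getD (idx+1) 0 <<< 8) ||| (L.getD (idx+2) 0 <<< 16) ||| (L.getD (idx+3) 0 <<< 24)

-- A's pre-finalisation hash (block loop + tail), abstracted from the port.
def pvApre (L : List Nat) (h : Nat) : Nat :=
  let nblocks := L.length / 4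
  let hv := (List.range nblocks).foldl (fun hv i => pvStepH hv (pvWord4 L (i * 4))) h
  let tail_index := nblocks * 4
  let k : Nat := 0
  let tail_size := L.length &&& 3
  let k := if tail_size ≥ 3 then k ^^^ (L.getD (tail_index+2) 0 <<< 16) else k
  let k := if tail_size ≥ 2 then k ^^^ (L.getD (tail_index+1) 0 <<< 8) else k
  let k := if tail_size ≥ 1 then k ^^^ L.getD tail_index 0 else k
  if tail_size > 0 then hv ^^^ pvMixK k else hv

-- B's streaming step and pre-finalisation hash, abstracted from the port.
def pvBstep (st : Nat × Nat × Nat) (byte : Nat) : Nat × Nat × Nat :=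
  let k := st.1 ||| (byte <<< (8 * st.2.1))
  let cnt := st.2.1 + 1
  let h := st.2.2
  if cnt == 4 then ((0 : Nat), (0 : Nat), pvStepH h k) else (k, cnt, h)

def pvBpre (L : List Nat) (h : Nat) : Nat :=
  let st := L.foldl pvBstep ((0 : Nat), (0 : Nat), h)
  if st.2.1 ≠ 0 then st.2.2 ^^^ pvMixK st.1 else st.2.2

lemma port_A_eq (key : String) :
    murmur_hash_py key =
      |((pvFin (key.toList.map (fun c => c.toNat)).length
          (pvApre (key.toList.map (fun c => c.toNat)) 0x9747b28c) : Int))| := rfl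

lemma port_B_eq (key : String) :
    murmur_hash_py_alt key =
      ((pvFin (key.toList.map (fun c => c.toNat)).length
          (pvBpre (key.toList.map (fun c => c.toNat)) 0x9747b28c) : Int)) := rfl

lemma xor_eq_or_of_and_eq_zero (x y : Nat) (h : x &&& y = 0) : x ^^^ y = x ||| y := by
  apply Nat.eq_of_testBit_eq
  intro i
  have h2 := congrArg (fun n => n.testBit i) h
  simp [Nat.testBit_and] at h2
  by_cases hx : x.testBit i
  · simp [Nat.testBit_xor, Nat.testBit_or, hx, h2 hx]
  · simp [Nat.testBit_xor, Nat.testBit_or, hx]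

lemma and_shl_eq_zero (a b k : Nat) (ha : a < 2 ^ k) : a &&& (b <<< k) = 0 := by
  apply Nat.eq_of_testBit_eq
  intro i
  by_cases hk : k ≤ i
  · have : a.testBit i = false :=
      Nat.testBit_eq_false_of_lt (lt_of_lt_of_le ha (Nat.pow_le_pow_right (by norm_num) hk))
    simp [Nat.testBit_and, this]
  · simp [Nat.testBit_and, Nat.testBit_shiftLeft, hk]

lemma getD_cons4 (L : List Nat) (a b c d x : Nat) :
    (a :: b :: c :: d :: L).getD (x + 4) 0 = L.getD x 0 := by
  show (a :: b :: c :: d :: L).getD (x + 1 + 1 + 1 + 1) 0 = L.getD x 0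
  simp

lemma word4_shift (t : List Nat) (a b c d i : Nat) :
    pvWord4 (a :: b :: c :: d :: t) ((i + 1) * 4) = pvWord4 t (i * 4) := by
  unfold pvWord4
  rw [show (i + 1) * 4 = i * 4 + 4 by ring,
      show i * 4 + 4 + 1 = (i * 4 + 1) + 4 by ring,
      show i * 4 + 4 + 2 = (i * 4 + 2) + 4 by ring,
      show i * 4 + 4 + 3 = (i * 4 + 3) + 4 by ring,
      getD_cons4, getD_cons4, getD_cons4, getD_cons4]

lemma and3_mod (n : Nat) : n &&& 3 = n % 4 := by
  have := Nat.and_two_pow_sub_one_eq_mod n 2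
  norm_num at this
  exact this

lemma tail_shift (t : List Nat) (a b c d j : Nat) :
    (a :: b :: c :: d :: t).getD ((t.length / 4 + 1) * 4 + j) 0 =
      t.getD (t.length / 4 * 4 + j) 0 := by
  rw [show (t.length / 4 + 1) * 4 + j = (t.length / 4 * 4 + j) + 4 by ring, getD_cons4]

lemma A_step (t : List Nat) (a b c d h : Nat) :
    pvApre (a :: b :: c :: d :: t) h =
      pvApre t (pvStepH h ((a ||| (b <<< 8)) ||| (c <<< 16) ||| (d <<< 24))) := by
  unfold pvApre
  simp only [List.length_cons]
  rw [show (t.length + 1 + 1 + 1 + 1) / 4 = t.length / 4 + 1 by omega]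
  rw [show (t.length + 1 + 1 + 1 + 1) &&& 3 = t.length &&& 3 by
        rw [and3_mod, and3_mod]; omega]
  rw [List.range_succ_eq_map, List.foldl_cons, List.foldl_map]
  simp only [Nat.succ_eq_add_one, word4_shift, Nat.zero_mul]
  have g0 : (a :: b :: c :: d :: t).getD ((t.length / 4 + 1) * 4) 0 = t.getD (t.length / 4 * 4) 0 := by
    rw [show (t.length / 4 + 1) * 4 = t.length / 4 * 4 + 4 by ring, getD_cons4]
  have g1 := tail_shift t a b c d 1
  have g2 := tail_shift t a b c d 2
  simp only [g0, g1, g2]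
  simp [pvWord4, List.getD]

lemma B_step (t : List Nat) (a b c d h : Nat) :
    pvBpre (a :: b :: c :: d :: t) h =
      pvBpre t (pvStepH h ((a ||| (b <<< 8)) ||| (c <<< 16) ||| (d <<< 24))) := by
  unfold pvBpre
  simp [List.foldl_cons, pvBstep, Nat.shiftLeft_zero]

lemma tail2 (a b : Nat) (ha : a < 256) :
    (b <<< 8) ^^^ a = a ||| (b <<< 8) := by
  rw [Nat.xor_comm, xor_eq_or_of_and_eq_zero _ _ (and_shl_eq_zero a b 8 ha)]

lemma tail3 (a b c : Nat) (ha : a < 256) (hb : b < 256) :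
    ((c <<< 16) ^^^ (b <<< 8)) ^^^ a = (a ||| (b <<< 8)) ||| (c <<< 16) := by
  have hb16 : b <<< 8 < 2 ^ 16 := by
    rw [Nat.shiftLeft_eq]
    omega
  have h1 : (c <<< 16) ^^^ (b <<< 8) = (b <<< 8) ||| (c <<< 16) := by
    rw [Nat.xor_comm, xor_eq_or_of_and_eq_zero _ _ (and_shl_eq_zero _ c 16 hb16)]
  have hA : a &&& ((b <<< 8) ||| (c <<< 16)) = 0 := by
    rw [Nat.and_or_distrib_left, and_shl_eq_zero a b 8 ha,
        and_shl_eq_zero a c 16 (lt_trans ha (by norm_num)), Nat.or_self]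
  rw [h1, Nat.xor_comm, xor_eq_or_of_and_eq_zero _ _ hA, ← Nat.or_assoc]

theorem pvCore : ∀ (L : List Nat), (∀ x ∈ L, x < 256) → ∀ h : Nat, pvApre L h = pvBpre L h
  | a :: b :: c :: d :: t, hb, h => by
      rw [A_step, B_step]
      exact pvCore t (fun x hx => hb x (by simp [hx])) _
  | [], _, h => by rfl
  | [a], hb, h => by
      simp [pvApre, pvBpre, pvBstep, pvWord4]
  | [a, b], hb, h => by
      simp [pvApre, pvBpre, pvBstep]
      rw [tail2 a b (hb a (by simp))]
  | [a, b, c], hb, h => by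
      simp [pvApre, pvBpre, pvBstep]
      rw [tail3 a b c (hb a (by simp)) (hb b (by simp))]

-- ===== VERDICT (by name: the statement is the Claim_ definition above) =====
theorem murmur_hash_py_spec : Claim_equal_murmur_hash_py := by
  intro key hdom
  unfold Spec_murmur_hash_py
  rw [port_A_eq, port_B_eq]
  have hb : ∀ x ∈ key.toList.map (fun c => c.toNat), x < 256 := by
    intro x hx
    rcases List.mem_map.mp hx with ⟨ch, hch, rfl⟩
    have := (List.all_eq_true.mp hdom) ch hch
    simp [pvDomChar] at this
    omega
  rw [pvCore _ hb]
  exact abs_of_nonneg (by positivity)
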